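-- pv_equiv track=rewrite | github.com/bamdadd/lintel | src/lintel/workflows/nodes/test_code.py | _pick_test_target_from_output
-- ===== SOURCE A (Python) =====
-- def _pick_test_target_from_output(output: str) -> str | None:
--     """Pick the best test target from make help or target list output.
--
--     Priority: 'test' > 'test-all' > 'all' > 'check' > 'test-unit' > 'verify'
--     Only matches the first token on each line (the target name), not descriptions.
--     """
--     # Extract first token from each line — that's the target name
--     targets: set[str] = set()
--     for line in output.lower().strip().split("\n"):
--         tokens = line.split()
--         if tokens:
--             targets.add(tokens[0])
--
--     preferred = ("test", "test-all", "all", "check", "test-unit", "verify")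
--     for candidate in preferred:
--         if candidate in targets:
--             return candidate
--     return None
-- ===== SOURCE B (Python) =====
-- def _pick_test_target_from_output(output: str) -> str | None:
--     """Single pass: keep the best (lowest) priority rank seen among first tokens."""
--     pref = {"test": 0, "test-all": 1, "all": 2, "check": 3, "test-unit": 4, "verify": 5}
--     names = ("test", "test-all", "all", "check", "test-unit", "verify")
--     best = len(names)
--     for line in output.lower().strip().split("\n"):
--         tokens = line.split()
--         if tokens:
--             rank = pref.get(tokens[0])
--             if rank is not None and rank < best:
--                 best = rank
--     return names[best] if best < len(names) else None
-- ===== Notes on version B (the rewrite author's own statement) =====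
-- stated objective: alternative
-- what changed: Replaces A's two phases (build a set of first tokens, then probe six candidates against it) with one pass that keeps a running minimum priority rank via a precomputed priority dict, indexing the names tuple at the end.
import Mathlib
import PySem

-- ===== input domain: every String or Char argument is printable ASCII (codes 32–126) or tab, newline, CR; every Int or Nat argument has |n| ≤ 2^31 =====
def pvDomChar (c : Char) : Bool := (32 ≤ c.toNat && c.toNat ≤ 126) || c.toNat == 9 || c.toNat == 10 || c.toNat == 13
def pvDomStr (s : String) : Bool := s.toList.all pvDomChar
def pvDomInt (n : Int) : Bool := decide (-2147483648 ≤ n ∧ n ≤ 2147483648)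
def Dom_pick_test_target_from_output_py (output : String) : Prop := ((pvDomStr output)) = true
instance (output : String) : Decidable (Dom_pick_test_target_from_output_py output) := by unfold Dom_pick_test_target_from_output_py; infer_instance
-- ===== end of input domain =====

-- B replaces A's two phases (collect first tokens into a set, then probe six candidates)
-- with a single pass keeping a running minimum priority rank; alternative decomposition, same cost.


-- ===== PORT A =====
-- 'for candidate in preferred: if candidate in targets: return candidate' / 'return None'
def pvPickLoop (cands : List String) (targets : PySem.Set String) : Option String :=
  match cands with
  | [] => none
  | c :: rest => if PySem.Set.contains targets c then some c else pvPickLoop rest targets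

-- split("\n") with a non-empty literal separator never fails; '.getD []' is the dead none branch
def pick_test_target_from_output_py (output : String) : Option String :=
  let targets : PySem.Set String :=
    ((PySem.Str.split? (PySem.Str.strip (PySem.Str.lower output)) "\n").getD []).foldl
      (fun s line =>
        match PySem.Str.split₀ line with
        | [] => s
        | t :: _ => PySem.Set.add s t) PySem.Set.empty
  pvPickLoop ["test", "test-all", "all", "check", "test-unit", "verify"] targets

-- ===== PORT B =====
def pvPref : PySem.Dict String Int :=
  PySem.Dict.ofList [("test", 0), ("test-all", 1), ("all", 2), ("check", 3), ("test-unit", 4), ("verify", 5)]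

def pvNames : List String := ["test", "test-all", "all", "check", "test-unit", "verify"]

def pick_test_target_from_output_py_alt (output : String) : Option String :=
  let best : Int :=
    ((PySem.Str.split? (PySem.Str.strip (PySem.Str.lower output)) "\n").getD []).foldl
      (fun best line =>
        match PySem.Str.split₀ line with
        | [] => best
        | t :: _ =>
          match PySem.Dict.get? pvPref t with
          | none => best
          | some r => if r < best then r else best) (6 : Int)
  if best < 6 then PySem.List.pyGet? pvNames best else none

-- ===== PRECONDITION & SPEC =====
def Spec_pick_test_target_from_output_py (output : String) (out : Option String) : Prop := out = pick_test_target_from_output_py_alt output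
instance (output : String) (out : Option String) : Decidable (Spec_pick_test_target_from_output_py output out) := by unfold Spec_pick_test_target_from_output_py; infer_instance

-- ===== CLAIM (what is proved, stated in full; the proofs are below) =====
def Claim_equal_pick_test_target_from_output_py : Prop := ∀ (output : String), Dom_pick_test_target_from_output_py output → Spec_pick_test_target_from_output_py output (pick_test_target_from_output_py output)

-- ===== LEMMAS AND PROOFS =====

-- both loops consume only the first token of each line: rewrite them as folds over the token list
def pvToks (lines : List String) : List String :=
  lines.filterMap (fun l => (PySem.Str.split₀ l).head?)

theorem pv_foldl_firstTok {β : Type} (h : β → String → β) :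
    ∀ (lines : List String) (b : β),
      lines.foldl (fun s line =>
        match PySem.Str.split₀ line with
        | [] => s
        | t :: _ => h s t) b = (pvToks lines).foldl h b := by
  intro lines
  induction lines with
  | nil => intro b; rfl
  | cons l ls ih =>
    intro b
    simp only [List.foldl_cons, pvToks, List.filterMap_cons]
    cases hs : PySem.Str.split₀ l with
    | nil => simpa [pvToks] using ih b
    | cons t rest => simpa [pvToks] using ih (h b t)

-- B's inner step, over tokens
def pvStep (b : Int) (t : String) : Int :=
  match PySem.Dict.get? pvPref t with
  | none => b
  | some r => if r < b then r else b

theorem pvPref_eq_mk : pvPref = PySem.Dict.mk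
    [("test", 0), ("test-all", 1), ("all", 2), ("check", 3), ("test-unit", 4), ("verify", 5)] := rfl

theorem pvPref_rank_bounds (t : String) (r : Int) (h : PySem.Dict.get? pvPref t = some r) :
    0 ≤ r ∧ r ≤ 5 := by
  rw [pvPref_eq_mk] at h
  simp only [PySem.Dict.get?_mk_cons] at h
  split_ifs at h <;>
    first
      | (simp only [Option.some.injEq] at h; omega)
      | exact absurd h (by simp [show (PySem.Dict.mk ([] : List (String × Int))).get? t = none from rfl])

theorem pvStep_le (b : Int) (t : String) (hb : b ≤ 6) : pvStep b t ≤ 6 := by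
  cases h : PySem.Dict.get? pvPref t with
  | none => simpa [pvStep, h] using hb
  | some r =>
    have := pvPref_rank_bounds t r h
    simp only [pvStep, h]
    split_ifs <;> omega

theorem pv_foldl_le : ∀ (ts : List String) (b : Int), b ≤ 6 → ts.foldl pvStep b ≤ 6 := by
  intro ts
  induction ts with
  | nil => intro b hb; simpa using hb
  | cons t ts ih => intro b hb; exact ih _ (pvStep_le b t hb)

theorem pv_foldl_min : ∀ (ts : List String) (b : Int), b ≤ 6 →
    ts.foldl pvStep b = min b (ts.foldl pvStep 6) := by
  intro ts
  induction ts with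
  | nil => intro b hb; simp; omega
  | cons t ts ih =>
    intro b hb
    simp only [List.foldl_cons]
    rw [ih _ (pvStep_le b t hb), ih _ (pvStep_le 6 t le_rfl)]
    have hX : ts.foldl pvStep 6 ≤ 6 := pv_foldl_le ts 6 le_rfl
    cases h : PySem.Dict.get? pvPref t with
    | none => simp only [pvStep, h]; omega
    | some r =>
      have := pvPref_rank_bounds t r h
      simp only [pvStep, h]
      split_ifs <;> omega

-- the if-chain value of the running minimum
def pvChain (ts : List String) : Int :=
  if ts.contains "test" then 0
  else if ts.contains "test-all" then 1
  else if ts.contains "all" then 2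
  else if ts.contains "check" then 3
  else if ts.contains "test-unit" then 4
  else if ts.contains "verify" then 5
  else 6

theorem pv_min_chain (t : String) (ts : List String) :
    min (pvStep 6 t) (pvChain ts) = pvChain (t :: ts) := by
  by_cases h0 : t = "test"
  · subst h0
    rw [show pvStep 6 "test" = 0 from by decide]
    simp [pvChain]
    split_ifs <;> omega
  by_cases h1 : t = "test-all"
  · subst h1
    rw [show pvStep 6 "test-all" = 1 from by decide]
    simp [pvChain]
    split_ifs <;> omega
  by_cases h2 : t = "all"
  · subst h2
    rw [show pvStep 6 "all" = 2 from by decide]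
    simp [pvChain]
    split_ifs <;> omega
  by_cases h3 : t = "check"
  · subst h3
    rw [show pvStep 6 "check" = 3 from by decide]
    simp [pvChain]
    split_ifs <;> omega
  by_cases h4 : t = "test-unit"
  · subst h4
    rw [show pvStep 6 "test-unit" = 4 from by decide]
    simp [pvChain]
    split_ifs <;> omega
  by_cases h5 : t = "verify"
  · subst h5
    rw [show pvStep 6 "verify" = 5 from by decide]
    simp [pvChain]
    split_ifs <;> omega
  · have hget : PySem.Dict.get? pvPref t = none := by
      rw [pvPref_eq_mk]
      simp only [PySem.Dict.get?_mk_cons, beq_iff_eq, Ne.symm h0, Ne.symm h1, Ne.symm h2,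
        Ne.symm h3, Ne.symm h4, Ne.symm h5, if_false]
      rfl
    rw [show pvStep 6 t = 6 from by simp [pvStep, hget]]
    have e0 : ("test" == t) = false := by simp [Ne.symm h0]
    have e1 : ("test-all" == t) = false := by simp [Ne.symm h1]
    have e2 : ("all" == t) = false := by simp [Ne.symm h2]
    have e3 : ("check" == t) = false := by simp [Ne.symm h3]
    have e4 : ("test-unit" == t) = false := by simp [Ne.symm h4]
    have e5 : ("verify" == t) = false := by simp [Ne.symm h5]
    simp only [pvChain, List.contains_cons, e0, e1, e2, e3, e4, e5, Bool.false_or]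
    split_ifs <;> omega

theorem pv_g_eq_chain : ∀ (ts : List String), ts.foldl pvStep 6 = pvChain ts := by
  intro ts
  induction ts with
  | nil => rfl
  | cons t ts ih =>
    simp only [List.foldl_cons]
    rw [pv_foldl_min ts (pvStep 6 t) (pvStep_le 6 t le_rfl), ih, pv_min_chain]

-- A's set of first tokens has the same members as the token list
theorem pv_contains_fold (ts : List String) (c : String) :
    PySem.Set.contains (ts.foldl PySem.Set.add PySem.Set.empty) c = ts.contains c := by
  have h : ts.foldl PySem.Set.add PySem.Set.empty = PySem.Set.ofList ts :=
    (PySem.Set.ofList_eq_foldl ts).symm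
  rw [h]
  simp only [PySem.Set.contains_eq_listContains, List.contains_eq_mem]
  simp [PySem.Set.mem_ofList]

-- B's loop body, named so its fold can be rewritten to a fold over the token list
theorem pv_foldl_firstTok_B : ∀ (lines : List String) (b : Int),
    lines.foldl (fun best line =>
      match PySem.Str.split₀ line with
      | [] => best
      | t :: _ =>
        match PySem.Dict.get? pvPref t with
        | none => best
        | some r => if r < best then r else best) b = (pvToks lines).foldl pvStep b :=
  fun lines b => pv_foldl_firstTok pvStep lines b

-- ===== VERDICT (by name: the statement is the Claim_ definition above) =====
theorem pick_test_target_from_output_py_spec : Claim_equal_pick_test_target_from_output_py := by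
  intro output _
  unfold Spec_pick_test_target_from_output_py
  unfold pick_test_target_from_output_py pick_test_target_from_output_py_alt
  set lines := (PySem.Str.split? (PySem.Str.strip (PySem.Str.lower output)) "\n").getD [] with hlines
  clear hlines
  rw [pv_foldl_firstTok (fun s t => PySem.Set.add s t) lines PySem.Set.empty,
      pv_foldl_firstTok_B lines 6]
  set ts := pvToks lines with hts
  clear hts
  show pvPickLoop _ _ = (if ts.foldl pvStep 6 < 6 then PySem.List.pyGet? pvNames (ts.foldl pvStep 6) else none)
  rw [pv_g_eq_chain]
  simp only [pvPickLoop, pv_contains_fold]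
  unfold pvChain
  split_ifs <;> first | rfl | omega
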